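-- pv_equiv track=rewrite | github.com/duke121/PDGARatings | fixData.py | apply_decay
-- ===== SOURCE A (Python) =====
-- from collections import defaultdict
--
-- def apply_decay(filled, players, full_dates):
--     final = defaultdict(dict)
--     last_base_rating = {}
--     unchanged_count = defaultdict(int)
--
--     for date in full_dates:
--         for player in players:
--             if player not in filled[date]:
--                 continue
--
--             base_rating = int(filled[date][player])
--
--             if player in last_base_rating:
--                 if base_rating == last_base_rating[player]:
--                     unchanged_count[player] += 1
--                 else:
--                     unchanged_count[player] = 0
--             else:
--                 unchanged_count[player] = 0
--             # decay ratings by 3 points every month after 3 months of no change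
--             decay_steps = max(0, unchanged_count[player] - 2)
--             decayed_rating = base_rating - (3 * decay_steps)
--             final[date][player] = decayed_rating
--             last_base_rating[player] = base_rating
--
--     return final
-- ===== SOURCE B (Python) =====
-- from collections import defaultdict
--
--
-- def apply_decay(filled, players, full_dates):
--     # Decay state is per player, so split the timeline into per-player visit
--     # streams (one visit per roster slot per date the player is rated on),
--     # scan each stream independently, then assemble the nested result table.
--     visits = defaultdict(list)
--     for i, date in enumerate(full_dates):
--         for j, player in enumerate(players):
--             if player in filled[date]:
--                 visits[player].append((i, j, int(filled[date][player])))
--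
--     cell = {}
--     for stream in visits.values():
--         last = None
--         count = 0
--         for i, j, base in stream:
--             count = count + 1 if base == last else 0
--             cell[i, j] = base - 3 * max(0, count - 2)
--             last = base
--
--     final = defaultdict(dict)
--     for i, date in enumerate(full_dates):
--         for j, player in enumerate(players):
--             if (i, j) in cell:
--                 final[date][player] = cell[i, j]
--     return final
-- ===== Notes on version B (the rewrite author's own statement) =====
-- stated objective: alternative
-- what changed: A threads all players' decay state (last_base_rating / unchanged_count dicts) through one date-major nested loop; B first splits the timeline into per-player visit streams (one visit per roster slot per date the player is rated on), scans each stream independently with local last/count state into a flat table keyed by (date index, roster index), and then assembles the nested date->player mapping from that table.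
import Mathlib
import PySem

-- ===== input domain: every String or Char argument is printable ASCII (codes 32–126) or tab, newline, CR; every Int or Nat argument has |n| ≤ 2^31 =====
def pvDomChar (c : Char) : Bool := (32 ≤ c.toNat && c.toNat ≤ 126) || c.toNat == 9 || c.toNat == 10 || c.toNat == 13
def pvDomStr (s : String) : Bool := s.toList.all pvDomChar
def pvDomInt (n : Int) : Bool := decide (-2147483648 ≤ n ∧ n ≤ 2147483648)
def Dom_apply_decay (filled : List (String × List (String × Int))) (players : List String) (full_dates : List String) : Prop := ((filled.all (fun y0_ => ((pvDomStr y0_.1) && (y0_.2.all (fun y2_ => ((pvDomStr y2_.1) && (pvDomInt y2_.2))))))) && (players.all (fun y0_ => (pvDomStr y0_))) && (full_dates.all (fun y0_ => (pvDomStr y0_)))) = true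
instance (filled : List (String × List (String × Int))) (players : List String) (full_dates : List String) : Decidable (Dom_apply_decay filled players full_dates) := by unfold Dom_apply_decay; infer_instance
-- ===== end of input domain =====

-- B splits the timeline into per-player visit streams, scans each stream independently into a
-- flat (date index, roster index) table, then assembles the nested mapping; A threads all
-- players' decay state through one date-major nested loop — objective: alternative (not faster).

-- ===== PORT A =====
-- one (date, player) step of A's nested loop; state = (final, last_base_rating, unchanged_count).
-- Python raises KeyError when a date of full_dates is missing from filled: Pre_ excludes that, the
-- port reads an empty row there (so the player-membership test fails and the cell is skipped).
def aCell (filled : List (String × List (String × Int))) (date player : String)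
    (st : PySem.Dict String (PySem.Dict String Int) × PySem.Dict String Int × PySem.Dict String Int) :
    PySem.Dict String (PySem.Dict String Int) × PySem.Dict String Int × PySem.Dict String Int :=
  match (PySem.Dict.mk (PySem.Dict.getD (PySem.Dict.mk filled) date [])).get? player with
  | none => st     -- 'if player not in filled[date]: continue'
  | some base =>   -- base_rating = int(filled[date][player])  (int() is the identity on int values)
      let c : Int :=
        match st.2.1.get? player with
        | some lb => if base = lb then st.2.2.getD player 0 + 1 else 0
        | none => 0
      (st.1.insert date ((st.1.getD date PySem.Dict.empty).insert player (base - 3 * max 0 (c - 2))),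
       st.2.1.insert player base,
       st.2.2.insert player c)

-- the inner 'for player in players' loop for one date
def aDate (filled : List (String × List (String × Int))) (players : List String)
    (st : PySem.Dict String (PySem.Dict String Int) × PySem.Dict String Int × PySem.Dict String Int)
    (date : String) :
    PySem.Dict String (PySem.Dict String Int) × PySem.Dict String Int × PySem.Dict String Int :=
  players.foldl (fun st player => aCell filled date player st) st

def apply_decay (filled : List (String × List (String × Int))) (players : List String) (full_dates : List String) : List (String × List (String × Int)) :=
  ((full_dates.foldl (aDate filled players)
      (PySem.Dict.empty, PySem.Dict.empty, PySem.Dict.empty)).1).items.map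
    (fun kv => (kv.1, kv.2.items))

-- ===== PORT B =====
-- pass 1: 'visits[player].append((i, j, int(filled[date][player])))' for every (date, roster slot)
-- with the player present; a date missing from filled (excluded by Pre_, Python raises KeyError)
-- reads an empty row, so the membership test fails and the slot is skipped.
def bVisits (filled : List (String × List (String × Int))) (players full_dates : List String) :
    PySem.Dict String (List (Int × Int × Int)) :=
  (PySem.List.enumerate full_dates).foldl (fun vbp id =>
    (PySem.List.enumerate players).foldl (fun vbp jp =>
      match (PySem.Dict.mk (PySem.Dict.getD (PySem.Dict.mk filled) id.2 [])).get? jp.2 with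
      | none => vbp
      | some base => vbp.modify jp.2 [] (fun l => l ++ [(id.1, jp.1, base)])) vbp)
    PySem.Dict.empty

-- pass 2, one visit of a stream; state = (last, count, cell).
-- 'count = count + 1 if base == last else 0' (base == None is False)
def bScanStep (st : Option Int × Int × PySem.Dict (Int × Int) Int) (v : Int × Int × Int) :
    Option Int × Int × PySem.Dict (Int × Int) Int :=
  let count : Int :=
    match st.1 with
    | some lb => if v.2.2 = lb then st.2.1 + 1 else 0
    | none => 0
  (some v.2.2, count, st.2.2.insert (v.1, v.2.1) (v.2.2 - 3 * max 0 (count - 2)))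

-- 'for stream in visits.values(): last = None; count = 0; for i, j, base in stream: …'
def bCellTable (vbp : PySem.Dict String (List (Int × Int × Int))) : PySem.Dict (Int × Int) Int :=
  vbp.values.foldl (fun cell stream => (stream.foldl bScanStep (none, 0, cell)).2.2)
    PySem.Dict.empty

-- pass 3, one cell of the assembly: 'if (i, j) in cell: final[date][player] = cell[i, j]'
def bAsmCell (cell : PySem.Dict (Int × Int) Int) (i j : Int) (date player : String)
    (fin : PySem.Dict String (PySem.Dict String Int)) :
    PySem.Dict String (PySem.Dict String Int) :=
  match cell.get? (i, j) with
  | none => fin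
  | some v => fin.insert date ((fin.getD date PySem.Dict.empty).insert player v)

def apply_decay_alt (filled : List (String × List (String × Int))) (players : List String) (full_dates : List String) : List (String × List (String × Int)) :=
  let cell := bCellTable (bVisits filled players full_dates)
  (((PySem.List.enumerate full_dates).foldl
      (fun fin id => (PySem.List.enumerate players).foldl
        (fun fin jp => bAsmCell cell id.1 jp.1 id.2 jp.2 fin) fin)
      PySem.Dict.empty).items.map (fun kv => (kv.1, kv.2.items)))

-- ===== PRECONDITION & SPEC =====
-- Pre_ excludes exactly the inputs where some date of full_dates is missing from filled and the
-- roster is nonempty: there Python A raises KeyError (and Python B raises too); with an empty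
-- roster the row is never read.
def Pre_apply_decay (filled : List (String × List (String × Int))) (players : List String) (full_dates : List String) : Prop :=
  players = [] ∨ ∀ d ∈ full_dates, (PySem.Dict.mk filled).contains d = true
instance (filled : List (String × List (String × Int))) (players : List String) (full_dates : List String) : Decidable (Pre_apply_decay filled players full_dates) := by unfold Pre_apply_decay; infer_instance

def pvWitness_apply_decay : (List (String × List (String × Int))) × List String × List String :=
  ([("d1", [("p", 100)]), ("d2", [("p", 100), ("q", 90)])], ["p", "q"], ["d1", "d2"])

def Spec_apply_decay (filled : List (String × List (String × Int))) (players : List String) (full_dates : List String) (out : List (String × List (String × Int))) : Prop := out = apply_decay_alt filled players full_dates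
instance (filled : List (String × List (String × Int))) (players : List String) (full_dates : List String) (out : List (String × List (String × Int))) : Decidable (Spec_apply_decay filled players full_dates out) := by unfold Spec_apply_decay; infer_instance

-- ===== CLAIM (what is proved, stated in full; the proofs are below) =====
def Claim_equal_apply_decay : Prop := ∀ (filled : List (String × List (String × Int))) (players : List String) (full_dates : List String), Dom_apply_decay filled players full_dates → Pre_apply_decay filled players full_dates → Spec_apply_decay filled players full_dates (apply_decay filled players full_dates)

-- ===== LEMMAS AND PROOFS =====

-- the row of ratings filled[d] as a dict (empty when d is absent)
def pvRow (filled : List (String × List (String × Int))) (d : String) : PySem.Dict String Int :=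
  PySem.Dict.mk (PySem.Dict.getD (PySem.Dict.mk filled) d [])

-- the chronological rating history of player p over the date list ds
def pvHist (filled : List (String × List (String × Int))) (p : String) (ds : List String) : List Int :=
  ds.filterMap (fun d => (pvRow filled d).get? p)

-- length of the trailing run of equal values (1 on a singleton; 1 on [] by convention)
def pvRun (h : List Int) : Nat :=
  match h.reverse with
  | [] => 1
  | b :: t => 1 + (t.takeWhile (fun x => x == b)).length

-- player p's visit stream over the date suffix suf whose first date has timeline index s:
-- one (date index, roster index, rating) triple per roster slot of p per date p is rated on
def pvSeq (filled : List (String × List (String × Int))) (players : List String) (p : String)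
    (suf : List String) (s : Int) : List (Int × Int × Int) :=
  (PySem.List.enumerate suf s).flatMap (fun id =>
    (PySem.List.enumerate players).filterMap (fun jp =>
      if jp.2 = p then ((pvRow filled id.2).get? p).map (fun b => (id.1, jp.1, b)) else none))

-- the cell value B's scan writes for roster slot y, given the count c the scan carries into
-- the first slot of p on this date (walking the roster from index s)
def occSpec (p : String) (base : Int) : List String → Int → Int → Int → Option Int
  | [], _, _, _ => none
  | q :: rest, s, c, y =>
      if q = p then
        (if y = s then some (base - 3 * max 0 (c - 2)) else occSpec p base rest (s + 1) (c + 1) y)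
      else occSpec p base rest (s + 1) c y

-- the incoming count of a date block is (run − 1) · multiplicity
def blockVal (filled : List (String × List (String × Int))) (players : List String) (p : String)
    (pre : List String) (d : String) (y : Int) : Option Int :=
  match (pvRow filled d).get? p with
  | none => none
  | some base =>
      occSpec p base players 0
        (((pvRun (pvHist filled p (pre ++ [d])) : Int) - 1) * (players.count p : Int)) y

-- the cell of the table at timeline index x, roster index y, owned by player p
def cAt2 (filled : List (String × List (String × Int))) (players : List String) (p : String)
    (pre suf : List String) (x y : Int) : Option Int :=
  match suf with
  | [] => none
  | d :: rest =>
      if x = (pre.length : Int) then blockVal filled players p pre d y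
      else cAt2 filled players p (pre ++ [d]) rest x y

lemma cAt2_cons (filled : List (String × List (String × Int))) (players : List String)
    (p : String) (pre : List String) (d : String) (rest : List String) (x y : Int) :
    cAt2 filled players p pre (d :: rest) x y =
      if x = (pre.length : Int) then blockVal filled players p pre d y
      else cAt2 filled players p (pre ++ [d]) rest x y := rfl

lemma pvRun_append (h : List Int) (b : Int) :
    pvRun (h ++ [b]) = if h.getLast? = some b then pvRun h + 1 else 1 := by
  have hrev : (h ++ [b]).reverse = b :: h.reverse := by simp
  unfold pvRun
  rw [hrev]
  rcases hr : h.reverse with _ | ⟨a, t⟩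
  · have h0 : h = [] := by simpa using congrArg List.reverse hr
    subst h0; simp
  · have hlast : h.getLast? = some a := by rw [← List.head?_reverse, hr]; rfl
    rw [hlast]
    by_cases hab : a = b
    · subst hab
      simp [List.takeWhile]; omega
    · have hf : (a == b) = false := by simp [hab]
      simp [List.takeWhile, hf]; exact hab

lemma pvHist_append (filled : List (String × List (String × Int))) (p : String)
    (ds : List String) (d : String) :
    pvHist filled p (ds ++ [d]) =
      pvHist filled p ds ++ ((pvRow filled d).get? p).toList := by
  cases h : (pvRow filled d).get? p <;>
    simp [pvHist, List.filterMap_append, h, Option.toList]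

lemma cAt2_lt (filled : List (String × List (String × Int))) (players : List String)
    (p : String) :
    ∀ (suf pre : List String) (x y : Int), x < (pre.length : Int) →
      cAt2 filled players p pre suf x y = none := by
  intro suf
  induction suf with
  | nil => intro pre x y _; rfl
  | cons d rest ih =>
    intro pre x y hx
    rw [cAt2_cons, if_neg (by omega)]
    exact ih (pre ++ [d]) x y (by simp; omega)

lemma cAt2_append (filled : List (String × List (String × Int))) (players : List String)
    (p : String) :
    ∀ (pre1 pre0 suf : List String) (d : String) (y : Int),
      cAt2 filled players p pre0 (pre1 ++ d :: suf) ((pre0.length : Int) + (pre1.length : Int)) y =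
        blockVal filled players p (pre0 ++ pre1) d y := by
  intro pre1
  induction pre1 with
  | nil =>
    intro pre0 suf d y
    simp only [List.nil_append, List.append_nil, List.length_nil, Nat.cast_zero, add_zero]
    rw [cAt2_cons]
    simp
  | cons e rest ih =>
    intro pre0 suf d y
    show cAt2 filled players p pre0 (e :: (rest ++ d :: suf)) _ _ = _
    rw [cAt2_cons, if_neg (by simp only [List.length_cons]; push_cast; omega)]
    have h := ih (pre0 ++ [e]) suf d y
    have hc : ((pre0 ++ [e]).length : Int) + (rest.length : Int) =
        (pre0.length : Int) + ((e :: rest).length : Int) := by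
      simp only [List.length_append, List.length_cons, List.length_nil]
      push_cast; omega
    rw [hc] at h
    rw [h]
    simp

lemma occSpec_lt (p : String) (base : Int) :
    ∀ (ps : List String) (s c y : Int), y < s → occSpec p base ps s c y = none := by
  intro ps
  induction ps with
  | nil => intro s c y _; rfl
  | cons q rest ih =>
    intro s c y hy
    unfold occSpec
    split_ifs with hq hy
    · omega
    · exact ih (s + 1) (c + 1) y (by omega)
    · exact ih (s + 1) c y (by omega)

-- the value at the slot right after the roster prefix pr (the (pr.count p)-th occurrence)
lemma occSpec_at_prefix (p : String) (base : Int) :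
    ∀ (pr qr : List String) (s c : Int),
      occSpec p base (pr ++ p :: qr) s c (s + (pr.length : Int)) =
        some (base - 3 * max 0 (c + (pr.count p : Int) - 2)) := by
  intro pr
  induction pr with
  | nil =>
    intro qr s c
    unfold occSpec
    simp
  | cons e pr' ih =>
    intro qr s c
    show occSpec p base (e :: (pr' ++ p :: qr)) s c _ = _
    unfold occSpec
    by_cases he : e = p
    · rw [if_pos he, if_neg (by simp only [List.length_cons]; push_cast; omega)]
      have h := ih qr (s + 1) (c + 1)
      have hidx : (s + 1) + (pr'.length : Int) = s + ((e :: pr').length : Int) := by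
        simp only [List.length_cons]; push_cast; omega
      rw [hidx] at h
      rw [h, he]
      have : (c + 1) + ((pr'.count p : Int)) - 2 = c + (((p :: pr').count p : Int)) - 2 := by
        simp [List.count_cons]; push_cast; ring
      rw [this]
    · rw [if_neg he]
      have h := ih qr (s + 1) c
      have hidx : (s + 1) + (pr'.length : Int) = s + ((e :: pr').length : Int) := by
        simp only [List.length_cons]; push_cast; omega
      rw [hidx] at h
      rw [h]
      have : (pr'.count p : Int) = ((e :: pr').count p : Int) := by
        simp [List.count_cons, he]
      rw [this]

lemma occSpec_owner (p : String) (base : Int) :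
    ∀ (ps : List String) (s c y : Int) (v : Int),
      occSpec p base ps s c y = some v → ∃ n : Nat, y = s + (n : Int) ∧ ps[n]? = some p := by
  intro ps
  induction ps with
  | nil => intro s c y v h; exact absurd h (by simp [occSpec])
  | cons q rest ih =>
    intro s c y v h
    unfold occSpec at h
    split_ifs at h with hq hy
    · exact ⟨0, by omega, by simp [hq]⟩
    · obtain ⟨n, hn1, hn2⟩ := ih (s + 1) (c + 1) y v h
      exact ⟨n + 1, by omega, by simpa using hn2⟩
    · obtain ⟨n, hn1, hn2⟩ := ih (s + 1) c y v h
      exact ⟨n + 1, by omega, by simpa using hn2⟩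

lemma cAt2_owner (filled : List (String × List (String × Int))) (players : List String)
    (p : String) :
    ∀ (suf pre : List String) (x y : Int) (v : Int),
      cAt2 filled players p pre suf x y = some v →
        ∃ n : Nat, y = (n : Int) ∧ players[n]? = some p := by
  intro suf
  induction suf with
  | nil => intro pre x y v h; exact absurd h (by simp [cAt2])
  | cons d rest ih =>
    intro pre x y v h
    rw [cAt2_cons] at h
    split_ifs at h with hx
    · unfold blockVal at h
      rcases hg : (pvRow filled d).get? p with _ | base
      · rw [hg] at h; exact absurd h (by simp)
      · rw [hg] at h
        obtain ⟨n, hn1, hn2⟩ := occSpec_owner p base players 0 _ y v h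
        exact ⟨n, by omega, hn2⟩
    · exact ih (pre ++ [d]) x y v h

-- the count fed to the first occurrence of a date block
def occC (l0 : Option Int) (c0 base : Int) : Int :=
  match l0 with
  | some lb => if base = lb then c0 + 1 else 0
  | none => 0

-- scanning the occurrence block of one date: final state and the cells written
lemma occFold (p : String) (i base : Int) :
    ∀ (ps : List String) (s : Int) (l0 : Option Int) (c0 : Int)
      (cell : PySem.Dict (Int × Int) Int),
      (((PySem.List.enumerate ps s).filterMap
          (fun jp => if jp.2 = p then some ((i : Int), jp.1, base) else none)).foldl
        bScanStep (l0, c0, cell)).1 = (if ps.count p = 0 then l0 else some base) ∧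
      (((PySem.List.enumerate ps s).filterMap
          (fun jp => if jp.2 = p then some ((i : Int), jp.1, base) else none)).foldl
        bScanStep (l0, c0, cell)).2.1 =
        (if ps.count p = 0 then c0 else occC l0 c0 base + (ps.count p : Int) - 1) ∧
      ∀ x y : Int,
        ((((PySem.List.enumerate ps s).filterMap
            (fun jp => if jp.2 = p then some ((i : Int), jp.1, base) else none)).foldl
          bScanStep (l0, c0, cell)).2.2).get? (x, y) =
          (match (if x = i then occSpec p base ps s (occC l0 c0 base) y else none) with
           | some v => some v
           | none => cell.get? (x, y)) := by
  intro ps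
  induction ps with
  | nil =>
    intro s l0 c0 cell
    refine ⟨by simp [PySem.List.enumerate_nil], by simp [PySem.List.enumerate_nil], ?_⟩
    intro x y
    simp [PySem.List.enumerate_nil, occSpec]
  | cons q rest ih =>
    intro s l0 c0 cell
    by_cases hq : q = p
    · have hlist : List.filterMap
          (fun jp => if jp.2 = p then some ((i : Int), jp.1, base) else none)
          (PySem.List.enumerate (q :: rest) s) =
          ((i : Int), s, base) :: List.filterMap
            (fun jp => if jp.2 = p then some ((i : Int), jp.1, base) else none)
            (PySem.List.enumerate rest (s + 1)) := by
        rw [PySem.List.enumerate_cons, List.filterMap_cons]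
        simp [hq]
      rw [hlist, List.foldl_cons]
      have hstep : bScanStep (l0, c0, cell) ((i : Int), s, base) =
          (some base, occC l0 c0 base,
            cell.insert (i, s) (base - 3 * max 0 (occC l0 c0 base - 2))) := rfl
      rw [hstep]
      obtain ⟨ih1, ih2, ih3⟩ := ih (s + 1) (some base) (occC l0 c0 base)
        (cell.insert (i, s) (base - 3 * max 0 (occC l0 c0 base - 2)))
      have hocc : occC (some base) (occC l0 c0 base) base = occC l0 c0 base + 1 := by
        simp [occC]
      have hcnt : (q :: rest).count p = rest.count p + 1 := by
        simp [List.count_cons, hq]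
      refine ⟨?_, ?_, ?_⟩
      · rw [ih1, hcnt]
        by_cases h0 : rest.count p = 0 <;> simp [h0]
      · rw [ih2, hocc, hcnt]
        by_cases h0 : rest.count p = 0
        · rw [if_pos h0, if_neg (by omega), h0]
          push_cast
          ring
        · rw [if_neg h0, if_neg (by omega)]
          push_cast
          ring
      · intro x y
        rw [ih3 x y, hocc]
        have hspec : occSpec p base (q :: rest) s (occC l0 c0 base) y =
            (if y = s then some (base - 3 * max 0 (occC l0 c0 base - 2))
             else occSpec p base rest (s + 1) (occC l0 c0 base + 1) y) := by
          simp only [occSpec, if_pos hq]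
        rw [hspec]
        by_cases hx : x = i
        · rw [if_pos hx, if_pos hx]
          by_cases hy : y = s
          · subst hy
            rw [if_pos rfl,
              occSpec_lt p base rest (y + 1) (occC l0 c0 base + 1) y (by omega)]
            have hk : ((i : Int), y) = ((x : Int), y) := by rw [hx]
            rw [← hk, PySem.Dict.get?_insert_self]
          · rw [if_neg hy]
            cases hsp : occSpec p base rest (s + 1) (occC l0 c0 base + 1) y
            · rw [PySem.Dict.get?_insert_of_ne]
              intro h0
              apply hy
              have := congrArg Prod.snd h0
              simpa using this
            · rfl
        · rw [if_neg hx, if_neg hx]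
          rw [PySem.Dict.get?_insert_of_ne]
          intro h0
          apply hx
          have := congrArg Prod.fst h0
          simpa using this
    · have hlist : List.filterMap
          (fun jp => if jp.2 = p then some ((i : Int), jp.1, base) else none)
          (PySem.List.enumerate (q :: rest) s) =
          List.filterMap
            (fun jp => if jp.2 = p then some ((i : Int), jp.1, base) else none)
            (PySem.List.enumerate rest (s + 1)) := by
        rw [PySem.List.enumerate_cons, List.filterMap_cons]
        simp [hq]
      rw [hlist]
      obtain ⟨ih1, ih2, ih3⟩ := ih (s + 1) l0 c0 cell
      have hcnt : (q :: rest).count p = rest.count p := by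
        simp [List.count_cons, hq]
      refine ⟨by rw [ih1, hcnt], by rw [ih2, hcnt], ?_⟩
      intro x y
      rw [ih3 x y]
      have hspec : occSpec p base (q :: rest) s (occC l0 c0 base) y =
          occSpec p base rest (s + 1) (occC l0 c0 base) y := by
        simp only [occSpec, if_neg hq]
      rw [hspec]

-- scanning player p's whole visit stream (p listed in players), date block by date block
lemma dateScan (filled : List (String × List (String × Int))) (players : List String)
    (p : String) (hm : p ∈ players) :
    ∀ (suf pre : List String) (cell : PySem.Dict (Int × Int) Int) (count : Int),
      (pvHist filled p pre ≠ [] →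
        count = (players.count p : Int) * (pvRun (pvHist filled p pre) : Int) - 1) →
      ∀ x y : Int,
        (((pvSeq filled players p suf (pre.length : Int)).foldl bScanStep
            ((pvHist filled p pre).getLast?, count, cell)).2.2).get? (x, y) =
          (match cAt2 filled players p pre suf x y with
           | some v => some v
           | none => cell.get? (x, y)) := by
  intro suf
  induction suf with
  | nil =>
    intro pre cell count hcnt x y
    simp [pvSeq, PySem.List.enumerate_nil, cAt2]
  | cons d rest ih =>
    intro pre cell count hcnt x y
    have hseq : pvSeq filled players p (d :: rest) (pre.length : Int) =
        ((PySem.List.enumerate players).filterMap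
          (fun jp => if jp.2 = p then
            ((pvRow filled d).get? p).map (fun b => ((pre.length : Int), jp.1, b)) else none))
          ++ pvSeq filled players p rest ((pre.length : Int) + 1) := by
      simp [pvSeq, PySem.List.enumerate_cons]
    rw [hseq, List.foldl_append]
    have hlen : ((pre.length : Int) + 1) = ((pre ++ [d]).length : Int) := by simp
    rcases hg : (pvRow filled d).get? p with _ | base
    · -- p absent on date d: the block is empty, history unchanged
      have hblk : (PySem.List.enumerate players).filterMap
          (fun jp => if jp.2 = p then
            Option.map (fun b => ((pre.length : Int), jp.1, b)) none else none) =
          ([] : List (Int × Int × Int)) := by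
        rw [List.filterMap_eq_nil_iff]
        intro jp _
        split_ifs <;> rfl
      rw [hblk, List.foldl_nil]
      have hpv : pvHist filled p (pre ++ [d]) = pvHist filled p pre := by
        rw [pvHist_append, hg]; simp
      have hst : (pvHist filled p pre).getLast? = (pvHist filled p (pre ++ [d])).getLast? := by
        rw [hpv]
      rw [hlen, hst, ih (pre ++ [d]) cell count (by rw [hpv]; exact hcnt) x y, cAt2_cons]
      by_cases hx : x = (pre.length : Int)
      · rw [if_pos hx,
          cAt2_lt filled players p rest (pre ++ [d]) x y (by simp; omega)]
        unfold blockVal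
        rw [hg]
      · rw [if_neg hx]
    · -- p present with rating base: the block is p's occurrence list
      have hblk : (PySem.List.enumerate players).filterMap
          (fun jp => if jp.2 = p then
            Option.map (fun b => ((pre.length : Int), jp.1, b)) (some base) else none) =
          (PySem.List.enumerate players).filterMap
            (fun jp => if jp.2 = p then some ((pre.length : Int), jp.1, base) else none) := by
        have hf : (fun (jp : Int × String) => if jp.2 = p then
            Option.map (fun b => ((pre.length : Int), jp.1, b)) (some base) else none) =
            (fun (jp : Int × String) =>
              if jp.2 = p then some ((pre.length : Int), jp.1, base) else none) := by
          funext jp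
          split_ifs <;> rfl
        rw [hf]
      rw [hblk]
      obtain ⟨o1, o2, o3⟩ := occFold p (pre.length : Int) base players 0
        ((pvHist filled p pre).getLast?) count cell
      have hm1 : players.count p ≠ 0 := by
        have := List.one_le_count_iff.mpr hm
        omega
      have hpv : pvHist filled p (pre ++ [d]) = pvHist filled p pre ++ [base] := by
        rw [pvHist_append, hg]; rfl
      have hlast' : (pvHist filled p (pre ++ [d])).getLast? = some base := by
        rw [hpv, List.getLast?_concat]
      have hrun : occC ((pvHist filled p pre).getLast?) count base =
          ((pvRun (pvHist filled p (pre ++ [d])) : Int) - 1) * (players.count p : Int) := by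
        rcases hL : (pvHist filled p pre).getLast? with _ | lb
        · rw [hpv, pvRun_append, hL, if_neg (by simp)]
          simp [occC]
        · have hne : pvHist filled p pre ≠ [] := by
            intro h0; rw [h0] at hL; simp at hL
          by_cases hb : base = lb
          · have hcc : occC (some lb) count base = count + 1 := by simp [occC, hb]
            rw [hcc, hpv, pvRun_append, hL, hb, if_pos rfl, hcnt hne]
            push_cast
            ring
          · have hcc : occC (some lb) count base = 0 := by simp [occC, hb]
            rw [hcc, hpv, pvRun_append, hL,
              if_neg (by intro h0; exact hb (Option.some.inj h0).symm)]
            simp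
      rw [if_neg hm1] at o1 o2
      have hres : List.foldl bScanStep ((pvHist filled p pre).getLast?, count, cell)
          ((PySem.List.enumerate players).filterMap
            (fun jp => if jp.2 = p then some ((pre.length : Int), jp.1, base) else none)) =
          (some base, occC ((pvHist filled p pre).getLast?) count base
              + (players.count p : Int) - 1,
            (List.foldl bScanStep ((pvHist filled p pre).getLast?, count, cell)
              ((PySem.List.enumerate players).filterMap
                (fun jp => if jp.2 = p then some ((pre.length : Int), jp.1, base) else none))).2.2) :=
        Prod.ext o1 (Prod.ext o2 rfl)
      rw [hres, hlen, ← hlast',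
        ih (pre ++ [d]) _ _ (by
          intro _
          rw [hrun]
          push_cast
          ring) x y, cAt2_cons]
      by_cases hx : x = (pre.length : Int)
      · rw [if_pos hx,
          cAt2_lt filled players p rest (pre ++ [d]) x y (by simp; omega),
          o3 x y, if_pos hx]
        unfold blockVal
        rw [hg, hrun]
      · rw [if_neg hx]
        cases hc : cAt2 filled players p (pre ++ [d]) rest x y
        · rw [o3 x y, if_neg hx]
        · rfl

-- a player not on the roster has an empty visit stream
lemma pvSeq_not_mem (filled : List (String × List (String × Int))) (players : List String)
    (p : String) (hp : p ∉ players) (suf : List String) (s : Int) :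
    pvSeq filled players p suf s = [] := by
  unfold pvSeq
  rw [List.flatMap_eq_nil_iff]
  intro id _
  rw [List.filterMap_eq_nil_iff]
  intro jp hjp
  have hmem : jp.2 ∈ players := by
    obtain ⟨k, hk, he⟩ := (PySem.List.mem_enumerate_iff _ _ _).mp hjp
    rw [he]
    exact List.getElem_mem hk
  rw [if_neg (fun (he : jp.2 = p) => hp (he ▸ hmem))]

-- scanning a list of per-player streams: the table is the union of the players' columns
lemma tableFold (filled : List (String × List (String × Int))) (players full_dates : List String) :
    ∀ (L : List (String × List (Int × Int × Int))) (cell0 : PySem.Dict (Int × Int) Int),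
      (∀ qs ∈ L, qs.2 = pvSeq filled players qs.1 full_dates 0) →
      (L.map Prod.fst).Nodup →
      ∀ x y : Int,
        ((L.foldl (fun cell qs => (qs.2.foldl bScanStep (none, 0, cell)).2.2) cell0).get? (x, y)) =
          (match (L.map Prod.fst).findSome?
              (fun q => cAt2 filled players q [] full_dates x y) with
           | some v => some v
           | none => cell0.get? (x, y)) := by
  intro L
  induction L with
  | nil =>
    intro cell0 _ _ x y
    simp
  | cons qs rest ih =>
    intro cell0 hseq hnd x y
    rw [List.foldl_cons]
    have hq : qs.2 = pvSeq filled players qs.1 full_dates 0 := hseq qs (by simp)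
    have hres : ∀ x y : Int, ((qs.2.foldl bScanStep (none, 0, cell0)).2.2).get? (x, y) =
        (match cAt2 filled players qs.1 [] full_dates x y with
         | some v => some v
         | none => cell0.get? (x, y)) := by
      intro x y
      by_cases hmem : qs.1 ∈ players
      · have hds := dateScan filled players qs.1 hmem full_dates [] cell0 0
          (by intro h0; simp [pvHist] at h0) x y
        simpa [pvHist, hq] using hds
      · rw [hq, pvSeq_not_mem filled players qs.1 hmem full_dates 0]
        simp only [List.foldl_nil]
        cases hc : cAt2 filled players qs.1 [] full_dates x y
        · rfl
        · obtain ⟨n, _, hn2⟩ := cAt2_owner filled players qs.1 full_dates [] x y _ hc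
          exact absurd (List.mem_of_getElem? hn2) hmem
    have hnd' : (rest.map Prod.fst).Nodup := (List.nodup_cons.mp (by simpa using hnd)).2
    rw [ih ((qs.2.foldl bScanStep (none, 0, cell0)).2.2)
      (fun qs' h => hseq qs' (by simp [h])) hnd' x y]
    rw [List.map_cons, List.findSome?_cons]
    cases hc : cAt2 filled players qs.1 [] full_dates x y
    · cases hr : (rest.map Prod.fst).findSome?
        (fun q => cAt2 filled players q [] full_dates x y)
      · rw [hres x y, hc]
      · rfl
    · have hnone : (rest.map Prod.fst).findSome?
          (fun q => cAt2 filled players q [] full_dates x y) = none := by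
        rw [List.findSome?_eq_none_iff]
        intro q' hq'
        cases hc' : cAt2 filled players q' [] full_dates x y
        · rfl
        · exfalso
          obtain ⟨n, hn1, hn2⟩ := cAt2_owner filled players qs.1 full_dates [] x y _ hc
          obtain ⟨n', hn1', hn2'⟩ := cAt2_owner filled players q' full_dates [] x y _ hc'
          have hnn : n = n' := by omega
          subst hnn
          rw [hn2] at hn2'
          have hqq : q' = qs.1 := (Option.some.inj hn2').symm
          subst hqq
          exact (List.nodup_cons.mp (by simpa using hnd)).1 hq'
      rw [hnone, hres x y, hc]

-- B's assembly cell, expressed over the processed date prefix and player prefix (the canonical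
-- per-visit value both programs compute)
def bCellSpec (filled : List (String × List (String × Int))) (players : List String)
    (ds pr : List String) (d p : String) (fin : PySem.Dict String (PySem.Dict String Int)) :
    PySem.Dict String (PySem.Dict String Int) :=
  match (pvRow filled d).get? p with
  | none => fin
  | some base =>
    fin.insert d ((fin.getD d PySem.Dict.empty).insert p
      (base - 3 * max 0 (((pvRun (pvHist filled p (ds ++ [d])) : Int) - 1) * (players.count p : Int)
        + ((pr.count p : Int) + 1) - 3)))

-- with the table characterised, the assembly cell is the canonical cell
lemma asm_cell_spec (filled : List (String × List (String × Int)))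
    (players full_dates preD sufD pr qr : List String) (d p : String)
    (cell : PySem.Dict (Int × Int) Int) (ks : List String)
    (hfd : full_dates = preD ++ d :: sufD) (hpl : players = pr ++ p :: qr)
    (hcell : ∀ x y : Int, cell.get? (x, y) =
      ks.findSome? (fun q => cAt2 filled players q [] full_dates x y))
    (hks : pvSeq filled players p full_dates 0 ≠ [] → p ∈ ks)
    (fin : PySem.Dict String (PySem.Dict String Int)) :
    bAsmCell cell (preD.length : Int) (pr.length : Int) d p fin =
      bCellSpec filled players preD pr d p fin := by
  have hev : ∀ q, cAt2 filled players q [] full_dates (preD.length : Int) (pr.length : Int) =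
      blockVal filled players q preD d (pr.length : Int) := by
    intro q
    rw [hfd]
    have h := cAt2_append filled players q preD [] sufD d (pr.length : Int)
    simpa using h
  have hpn : players[pr.length]? = some p := by
    rw [hpl, List.getElem?_append_right (le_refl pr.length)]
    simp
  have howner : ∀ (q : String) (bq c v : Int),
      occSpec q bq players 0 c (pr.length : Int) = some v → q = p := by
    intro q bq c v hos
    obtain ⟨n, hn1, hn2⟩ := occSpec_owner q bq players 0 c _ v hos
    have hnn : n = pr.length := by omega
    subst hnn
    rw [hpn] at hn2
    exact (Option.some.inj hn2).symm
  rcases hg : (pvRow filled d).get? p with _ | base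
  · -- p absent on date d: the whole column of the table is empty here
    have hnone : ks.findSome?
        (fun q => cAt2 filled players q [] full_dates (preD.length : Int) (pr.length : Int)) =
        none := by
      rw [List.findSome?_eq_none_iff]
      intro q _
      rw [hev q]
      unfold blockVal
      rcases hgq : (pvRow filled d).get? q with _ | bq
      · rfl
      · show occSpec q bq players 0
          (((pvRun (pvHist filled q (preD ++ [d])) : Int) - 1) * (players.count q : Int))
          (pr.length : Int) = none
        cases hos : occSpec q bq players 0
          (((pvRun (pvHist filled q (preD ++ [d])) : Int) - 1) * (players.count q : Int))
          (pr.length : Int)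
        · rfl
        · exfalso
          have hqp : q = p := howner q bq _ _ hos
          subst hqp
          rw [hg] at hgq
          simp at hgq
    unfold bAsmCell bCellSpec
    rw [hcell, hnone, hg]
  · -- p present with rating base
    have helem : ((preD.length : Int), (pr.length : Int), base) ∈
        pvSeq filled players p full_dates 0 := by
      unfold pvSeq
      rw [List.mem_flatMap]
      refine ⟨((preD.length : Int), d), ?_, ?_⟩
      · rw [hfd, PySem.List.mem_enumerate_iff]
        refine ⟨preD.length, by simp, ?_⟩
        rw [List.getElem_append_right (le_refl preD.length)]
        simp
      · rw [List.mem_filterMap]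
        refine ⟨((pr.length : Int), p), ?_, ?_⟩
        · rw [hpl, PySem.List.mem_enumerate_iff]
          refine ⟨pr.length, by simp, ?_⟩
          rw [List.getElem_append_right (le_refl pr.length)]
          simp
        · simp [hg]
    have hmem : p ∈ ks := hks (List.ne_nil_of_mem helem)
    have hfp : cAt2 filled players p [] full_dates (preD.length : Int) (pr.length : Int) =
        some (base - 3 * max 0
          (((pvRun (pvHist filled p (preD ++ [d])) : Int) - 1) * (players.count p : Int)
            + (pr.count p : Int) - 2)) := by
      rw [hev p]
      unfold blockVal
      rw [hg]
      have h := occSpec_at_prefix p base pr qr 0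
        (((pvRun (pvHist filled p (preD ++ [d])) : Int) - 1) * (players.count p : Int))
      rw [← hpl] at h
      simpa using h
    have hfind : ks.findSome?
        (fun q => cAt2 filled players q [] full_dates (preD.length : Int) (pr.length : Int)) =
        some (base - 3 * max 0
          (((pvRun (pvHist filled p (preD ++ [d])) : Int) - 1) * (players.count p : Int)
            + (pr.count p : Int) - 2)) := by
      clear helem hcell hks
      induction ks with
      | nil => simp at hmem
      | cons k rest ih =>
        rw [List.findSome?_cons]
        by_cases hk : k = p
        · subst hk
          rw [hfp]
        · have hknone : cAt2 filled players k [] full_dates (preD.length : Int)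
              (pr.length : Int) = none := by
            rw [hev k]
            unfold blockVal
            rcases hgq : (pvRow filled d).get? k with _ | bq
            · rfl
            · show occSpec k bq players 0
                (((pvRun (pvHist filled k (preD ++ [d])) : Int) - 1) * (players.count k : Int))
                (pr.length : Int) = none
              cases hos : occSpec k bq players 0
                (((pvRun (pvHist filled k (preD ++ [d])) : Int) - 1) * (players.count k : Int))
                (pr.length : Int)
              · rfl
              · exact absurd (howner k bq _ _ hos) hk
          rw [hknone]
          refine ih ?_
          rcases List.mem_cons.mp hmem with h | h
          · exact absurd h.symm hk
          · exact h
    unfold bAsmCell bCellSpec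
    rw [hcell, hfind, hg]
    have harith : ((pvRun (pvHist filled p (preD ++ [d])) : Int) - 1) * (players.count p : Int)
        + (pr.count p : Int) - 2 =
        ((pvRun (pvHist filled p (preD ++ [d])) : Int) - 1) * (players.count p : Int)
          + ((pr.count p : Int) + 1) - 3 := by ring
    rw [harith]

-- the per-player state invariant carried by A's fold between dates, relative to the processed
-- date prefix ds; m is the player's multiplicity in players
def pvInv (filled : List (String × List (String × Int))) (m : Nat) (ds : List String) (p : String)
    (l c : PySem.Dict String Int) : Prop :=
  l.get? p = (pvHist filled p ds).getLast? ∧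
  (pvHist filled p ds ≠ [] →
    c.get? p = some ((m : Int) * (pvRun (pvHist filled p ds) : Int) - 1))

-- the state invariant in the middle of a date d, after the player prefix pr has been visited
def pvMid (filled : List (String × List (String × Int))) (players : List String) (d : String)
    (ds pr : List String) (p : String) (l c : PySem.Dict String Int) : Prop :=
  match (pvRow filled d).get? p with
  | some base =>
      if 1 ≤ pr.count p then
        l.get? p = some base ∧
        c.get? p = some ((players.count p : Int) *
          ((pvRun (pvHist filled p (ds ++ [d])) : Int) - 1) + (pr.count p : Int) - 1)
      else pvInv filled (players.count p) ds p l c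
  | none => pvInv filled (players.count p) ds p l c

lemma pvMid_init (filled : List (String × List (String × Int))) (players : List String)
    (d : String) (ds : List String) (p : String) (l c : PySem.Dict String Int)
    (h : pvInv filled (players.count p) ds p l c) :
    pvMid filled players d ds [] p l c := by
  unfold pvMid
  rcases hg : (pvRow filled d).get? p with _ | base
  · exact h
  · dsimp only
    rw [if_neg (by simp)]
    exact h

lemma pvMid_full (filled : List (String × List (String × Int))) (players : List String)
    (d : String) (ds : List String) (p : String) (l c : PySem.Dict String Int)
    (hmem : p ∈ players) (h : pvMid filled players d ds players p l c) :
    pvInv filled (players.count p) (ds ++ [d]) p l c := by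
  unfold pvMid at h
  rcases hg : (pvRow filled d).get? p with _ | base
  · rw [hg] at h
    dsimp only at h
    have hpv : pvHist filled p (ds ++ [d]) = pvHist filled p ds := by
      rw [pvHist_append, hg]
      simp
    unfold pvInv at h ⊢
    rw [hpv]
    exact h
  · rw [hg] at h
    dsimp only at h
    have hcnt : 1 ≤ players.count p := List.one_le_count_iff.mpr hmem
    rw [if_pos hcnt] at h
    have hpv : pvHist filled p (ds ++ [d]) = pvHist filled p ds ++ [base] := by
      rw [pvHist_append, hg]
      rfl
    constructor
    · rw [h.1, hpv, List.getLast?_concat]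
    · intro _
      rw [h.2]
      congr 1
      ring

lemma aCell_char (filled : List (String × List (String × Int))) (players : List String)
    (ds pr : List String) (d p : String) (f : PySem.Dict String (PySem.Dict String Int))
    (l c : PySem.Dict String Int)
    (hp : pvMid filled players d ds pr p l c) :
    (aCell filled d p (f, l, c)).1 = bCellSpec filled players ds pr d p f ∧
    pvMid filled players d ds (pr ++ [p]) p
      (aCell filled d p (f, l, c)).2.1 (aCell filled d p (f, l, c)).2.2 ∧
    (∀ p' : String, p' ≠ p →
      (aCell filled d p (f, l, c)).2.1.get? p' = l.get? p' ∧
      (aCell filled d p (f, l, c)).2.2.get? p' = c.get? p') := by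
  unfold pvMid at hp ⊢
  unfold aCell bCellSpec pvRow
  rcases hg : (PySem.Dict.mk (PySem.Dict.getD (PySem.Dict.mk filled) d [])).get? p with _ | base
  · -- player absent on date d: nothing changes
    have hg' : (pvRow filled d).get? p = none := hg
    rw [hg'] at hp
    dsimp only at hp
    exact ⟨rfl, hp, fun p' _ => ⟨rfl, rfl⟩⟩
  · -- player present with rating base: this is one more visit
    have hg' : (pvRow filled d).get? p = some base := hg
    rw [hg'] at hp
    dsimp only at hp
    have hpv : pvHist filled p (ds ++ [d]) = pvHist filled p ds ++ [base] := by
      rw [pvHist_append, hg']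
      rfl
    have hcnt1 : 1 ≤ (pr ++ [p]).count p := by
      rw [List.count_append]
      simp
    have hcnt : ((pr ++ [p]).count p : Int) = (pr.count p : Int) + 1 := by
      rw [List.count_append]
      push_cast
      simp
    -- the counter value A writes on this visit
    have hcv : (match l.get? p with
        | some lb => if base = lb then c.getD p 0 + 1 else 0
        | none => (0 : Int)) = (players.count p : Int) *
          ((pvRun (pvHist filled p (ds ++ [d])) : Int) - 1) + (pr.count p : Int) + 1 - 1 := by
      by_cases hj : 1 ≤ pr.count p
      · -- repeat visit within date d: l already holds base, counter just increments
        rw [if_pos hj] at hp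
        rw [hp.1]
        dsimp only
        rw [if_pos rfl]
        have hcd : c.getD p 0 = (players.count p : Int) *
            ((pvRun (pvHist filled p (ds ++ [d])) : Int) - 1) + (pr.count p : Int) - 1 := by
          simp [PySem.Dict.getD, hp.2]
        rw [hcd]
        ring
      · -- first visit of date d: fall back on the between-dates invariant
        rw [if_neg hj] at hp
        have hj0 : (pr.count p : Int) = 0 := by
          omega
        obtain ⟨hl, hc⟩ := hp
        rw [hl, hpv, pvRun_append]
        rcases hL : (pvHist filled p ds).getLast? with _ | lb
        · simp [hj0]
        · have hne : pvHist filled p ds ≠ [] := by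
            intro h0
            rw [h0] at hL
            simp at hL
          have hcd : c.getD p 0 = (players.count p : Int) *
              (pvRun (pvHist filled p ds) : Int) - 1 := by
            simp [PySem.Dict.getD, hc hne]
          by_cases hb : base = lb
          · subst hb
            simp only [hcd]
            push_cast
            ring_nf
            simp [hj0]
          · have hbb : ¬ (some lb = some base) := by
              intro h0
              exact hb (Option.some.inj h0).symm
            simp only [if_neg hb, if_neg hbb]
            simp [hj0]
    refine ⟨?_, ?_, ?_⟩
    · show f.insert d ((f.getD d PySem.Dict.empty).insert p _) =
        f.insert d ((f.getD d PySem.Dict.empty).insert p _)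
      rw [hcv]
      have harith : (players.count p : Int) *
          ((pvRun (pvHist filled p (ds ++ [d])) : Int) - 1) + (pr.count p : Int) + 1 - 1 - 2 =
          ((pvRun (pvHist filled p (ds ++ [d])) : Int) - 1) * (players.count p : Int)
            + ((pr.count p : Int) + 1) - 3 := by ring
      rw [harith]
    · dsimp only
      rw [if_pos hcnt1]
      constructor
      · show (l.insert p base).get? p = some base
        rw [PySem.Dict.get?_insert_self]
      · show (c.insert p _).get? p = _
        rw [PySem.Dict.get?_insert_self, hcv, hcnt]
        congr 1
        ring
    · intro p' hne
      exact ⟨PySem.Dict.get?_insert_of_ne _ _ hne, PySem.Dict.get?_insert_of_ne _ _ hne⟩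

lemma inner_fold (filled : List (String × List (String × Int))) (players : List String)
    (cell : PySem.Dict (Int × Int) Int) (ks : List String)
    (full_dates preD sufD : List String) (d : String)
    (hfd : full_dates = preD ++ d :: sufD)
    (hcell : ∀ x y : Int, cell.get? (x, y) =
      ks.findSome? (fun q => cAt2 filled players q [] full_dates x y))
    (hks : ∀ p ∈ players, pvSeq filled players p full_dates 0 ≠ [] → p ∈ ks) :
    ∀ (q pr : List String) (f : PySem.Dict String (PySem.Dict String Int))
      (l c : PySem.Dict String Int), players = pr ++ q →
      (∀ p ∈ players, pvMid filled players d preD pr p l c) →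
      (q.foldl (fun st player => aCell filled d player st) (f, l, c)).1 =
        (PySem.List.enumerate q (pr.length : Int)).foldl
          (fun fin jp => bAsmCell cell (preD.length : Int) jp.1 d jp.2 fin) f ∧
      (∀ p ∈ players, pvMid filled players d preD (pr ++ q) p
        (q.foldl (fun st player => aCell filled d player st) (f, l, c)).2.1
        (q.foldl (fun st player => aCell filled d player st) (f, l, c)).2.2) := by
  intro q
  induction q with
  | nil =>
    intro pr f l c _ hmid
    refine ⟨by simp [PySem.List.enumerate_nil], ?_⟩
    simpa using hmid
  | cons p q' ih =>
    intro pr f l c hpl hmid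
    have hpmem : p ∈ players := by
      rw [hpl]
      exact List.mem_append_right _ (by simp)
    obtain ⟨h1, h2, h3⟩ := aCell_char filled players preD pr d p f l c (hmid p hpmem)
    simp only [List.foldl_cons, PySem.List.enumerate_cons]
    rcases hst : aCell filled d p (f, l, c) with ⟨f', l', c'⟩
    rw [hst] at h1 h2 h3
    dsimp only at h1 h2 h3
    have hmid' : ∀ p' ∈ players, pvMid filled players d preD (pr ++ [p]) p' l' c' := by
      intro p' hp'
      by_cases he : p' = p
      · subst he
        exact h2
      · obtain ⟨e1, e2⟩ := h3 p' he
        have hcnt : (pr ++ [p]).count p' = pr.count p' := by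
          rw [List.count_append]
          simp [Ne.symm he]
        have := hmid p' hp'
        unfold pvMid pvInv at this ⊢
        rw [hcnt, e1, e2]
        exact this
    obtain ⟨g1, g2⟩ := ih (pr ++ [p]) f' l' c' (by rw [hpl]; simp) hmid'
    have hlen : (((pr ++ [p]).length : Nat) : Int) = (pr.length : Int) + 1 := by
      simp
    rw [hlen] at g1
    have hB : bAsmCell cell (preD.length : Int) (pr.length : Int) d p f =
        bCellSpec filled players preD pr d p f :=
      asm_cell_spec filled players full_dates preD sufD pr q' d p cell ks hfd hpl hcell
        (hks p hpmem) f
    refine ⟨?_, ?_⟩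
    · rw [g1, hB, ← h1]
    · intro pp hpp
      simpa using g2 pp hpp

lemma outer_fold (filled : List (String × List (String × Int))) (players : List String)
    (cell : PySem.Dict (Int × Int) Int) (ks : List String) (full_dates : List String)
    (hcell : ∀ x y : Int, cell.get? (x, y) =
      ks.findSome? (fun q => cAt2 filled players q [] full_dates x y))
    (hks : ∀ p ∈ players, pvSeq filled players p full_dates 0 ≠ [] → p ∈ ks) :
    ∀ (suf pre : List String) (f : PySem.Dict String (PySem.Dict String Int))
      (l c : PySem.Dict String Int), full_dates = pre ++ suf →
      (∀ p ∈ players, pvInv filled (players.count p) pre p l c) →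
      (suf.foldl (aDate filled players) (f, l, c)).1 =
        (PySem.List.enumerate suf (pre.length : Int)).foldl
          (fun fin id => (PySem.List.enumerate players).foldl
            (fun fin jp => bAsmCell cell id.1 jp.1 id.2 jp.2 fin) fin) f := by
  intro suf
  induction suf with
  | nil =>
    intro pre f l c _ _
    simp [PySem.List.enumerate]
  | cons d suf' ih =>
    intro pre f l c hfd hinv
    obtain ⟨h1, h2⟩ := inner_fold filled players cell ks full_dates pre suf' d hfd hcell hks
      players [] f l c (by simp)
      (fun p hp => pvMid_init filled players d pre p l c (hinv p hp))
    simp only [List.foldl_cons, PySem.List.enumerate_cons]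
    have hstep : aDate filled players (f, l, c) d =
        players.foldl (fun st player => aCell filled d player st) (f, l, c) := rfl
    rcases hst : players.foldl (fun st player => aCell filled d player st) (f, l, c)
      with ⟨f', l', c'⟩
    rw [hst] at h1 h2
    dsimp only at h1 h2
    simp only [List.length_nil, Nat.cast_zero] at h1
    have hinv' : ∀ p ∈ players, pvInv filled (players.count p) (pre ++ [d]) p l' c' := by
      intro p hp
      exact pvMid_full filled players d pre p l' c' hp (by simpa using h2 p hp)
    have hrec := ih (pre ++ [d]) f' l' c' (by rw [hfd]; simp) hinv'
    have hlen : (((pre ++ [d]).length : Nat) : Int) = (pre.length : Int) + 1 := by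
      simp
    rw [hlen] at hrec
    rw [hstep, hst, hrec, ← h1]

lemma nodup_keys_modify {κ ν : Type} [BEq κ] [LawfulBEq κ] (d : PySem.Dict κ ν) (k : κ)
    (d0 : ν) (f : ν → ν) (h : d.keys.Nodup) : (d.modify k d0 f).keys.Nodup := by
  rw [PySem.Dict.keys_modify]
  exact PySem.Dict.nodup_keys_insert _ _ _ h

-- one date of pass 1: what the inner roster loop appends to each player's stream
lemma bVisits_inner (filled : List (String × List (String × Int))) (d : String) (i : Int) :
    ∀ (ps : List String) (s : Int) (vbp : PySem.Dict String (List (Int × Int × Int)))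
      (q : String),
      (((PySem.List.enumerate ps s).foldl (fun vbp jp =>
          match (PySem.Dict.mk (PySem.Dict.getD (PySem.Dict.mk filled) d [])).get? jp.2 with
          | none => vbp
          | some base => vbp.modify jp.2 [] (fun l => l ++ [(i, jp.1, base)])) vbp).getD q []) =
        vbp.getD q [] ++ (match (pvRow filled d).get? q with
          | none => ([] : List (Int × Int × Int))
          | some rb => (PySem.List.enumerate ps s).filterMap
              (fun jp => if jp.2 = q then some (i, jp.1, rb) else none)) := by
  intro ps
  induction ps with
  | nil =>
    intro s vbp q
    rcases hgq : (pvRow filled d).get? q <;> simp [PySem.List.enumerate_nil]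
  | cons a rest ih =>
    intro s vbp q
    rw [PySem.List.enumerate_cons, List.foldl_cons]
    rcases hg : (PySem.Dict.mk (PySem.Dict.getD (PySem.Dict.mk filled) d [])).get? a
      with _ | ab
    · -- slot (s, a) skipped
      simp only [hg]
      rw [ih (s + 1) vbp q]
      congr 1
      rcases hgq : (pvRow filled d).get? q with _ | rb
      · rfl
      · have haq : a ≠ q := by
          intro h
          subst h
          have h0 : (pvRow filled d).get? a = none := hg
          rw [h0] at hgq
          simp at hgq
        dsimp only
        rw [List.filterMap_cons]
        simp [haq]
    · -- slot (s, a) appends to a's stream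
      simp only [hg]
      rw [ih (s + 1) (vbp.modify a [] (fun l => l ++ [(i, s, ab)])) q]
      by_cases haq : a = q
      · subst haq
        rw [PySem.Dict.getD_modify_self]
        have hgq : (pvRow filled d).get? a = some ab := hg
        rw [hgq]
        dsimp only
        rw [List.filterMap_cons]
        simp
      · rw [PySem.Dict.getD_modify_of_ne _ _ _ (Ne.symm haq)]
        congr 1
        rcases hgq : (pvRow filled d).get? q with _ | rb
        · rfl
        · dsimp only
          rw [List.filterMap_cons]
          simp [haq]

-- pass 1 characterised: each player's stored stream is its visit stream
lemma bVisits_getD (filled : List (String × List (String × Int))) (players : List String) :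
    ∀ (ds : List String) (s : Int) (vbp : PySem.Dict String (List (Int × Int × Int)))
      (q : String),
      (((PySem.List.enumerate ds s).foldl (fun vbp id =>
          (PySem.List.enumerate players).foldl (fun vbp jp =>
            match (PySem.Dict.mk (PySem.Dict.getD (PySem.Dict.mk filled) id.2 [])).get? jp.2 with
            | none => vbp
            | some base => vbp.modify jp.2 [] (fun l => l ++ [(id.1, jp.1, base)])) vbp)
        vbp).getD q []) =
        vbp.getD q [] ++ pvSeq filled players q ds s := by
  intro ds
  induction ds with
  | nil => intro s vbp q; simp [PySem.List.enumerate_nil, pvSeq]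
  | cons d rest ih =>
    intro s vbp q
    rw [PySem.List.enumerate_cons, List.foldl_cons]
    have hseq : pvSeq filled players q (d :: rest) s =
        ((PySem.List.enumerate players).filterMap (fun jp =>
          if jp.2 = q then ((pvRow filled d).get? q).map (fun b => (s, jp.1, b)) else none))
          ++ pvSeq filled players q rest (s + 1) := by
      simp [pvSeq, PySem.List.enumerate_cons]
    have hblk : (PySem.List.enumerate players).filterMap (fun jp =>
        if jp.2 = q then ((pvRow filled d).get? q).map (fun b => (s, jp.1, b)) else none) =
        (match (pvRow filled d).get? q with
          | none => ([] : List (Int × Int × Int))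
          | some rb => (PySem.List.enumerate players).filterMap
              (fun jp => if jp.2 = q then some (s, jp.1, rb) else none)) := by
      rcases hgq : (pvRow filled d).get? q with _ | rb
      · rw [List.filterMap_eq_nil_iff]
        intro jp _
        split_ifs <;> rfl
      · have hf : (fun (jp : Int × String) =>
            if jp.2 = q then Option.map (fun b => ((s : Int), jp.1, b)) (some rb) else none) =
            (fun (jp : Int × String) => if jp.2 = q then some ((s : Int), jp.1, rb) else none) := by
          funext jp
          split_ifs <;> rfl
        rw [hf]
    rw [hseq, hblk]
    dsimp only
    rw [ih (s + 1) _ q, bVisits_inner filled d s players 0 _ q]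
    simp

-- any fold whose step keeps the keys unique keeps the keys unique
lemma nodup_keys_foldl_generic {α κ ν : Type} [BEq κ] [LawfulBEq κ] (L : List α)
    (step : PySem.Dict κ ν → α → PySem.Dict κ ν)
    (hstep : ∀ d a, d.keys.Nodup → (step d a).keys.Nodup) :
    ∀ d : PySem.Dict κ ν, d.keys.Nodup → (L.foldl step d).keys.Nodup := by
  induction L with
  | nil => intro d h; exact h
  | cons a rest ih =>
    intro d h
    rw [List.foldl_cons]
    exact ih (step d a) (hstep d a h)

-- pass 1 keeps the stream dict's keys unique
lemma bVisits_nodup (filled : List (String × List (String × Int)))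
    (players full_dates : List String) :
    (bVisits filled players full_dates).keys.Nodup := by
  unfold bVisits
  refine nodup_keys_foldl_generic _ _ ?_ _ PySem.Dict.nodup_keys_empty
  intro vbp id h
  refine nodup_keys_foldl_generic _ _ ?_ _ h
  intro vbp' jp h'
  rcases hg : (PySem.Dict.mk (PySem.Dict.getD (PySem.Dict.mk filled) id.2 [])).get? jp.2
    with _ | base
  · simpa [hg] using h'
  · simp only [hg]
    exact nodup_keys_modify _ _ _ _ h'

-- first-match lookup of a member of a dup-free association list
lemma get?_of_mem_items {ν : Type} :
    ∀ (l : List (String × ν)) (k : String) (v : ν),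
      (l.map (fun x => x.1)).Nodup → (k, v) ∈ l → (PySem.Dict.mk l).get? k = some v := by
  intro l
  induction l with
  | nil => intro k v _ h; simp at h
  | cons a rest ih =>
    intro k v hnd hm
    rw [PySem.Dict.get?_mk_cons]
    by_cases hk : a.1 = k
    · rw [if_pos (by simp [hk])]
      rcases List.mem_cons.mp hm with h | h
      · rw [← h]
      · exfalso
        have h1 : k ∈ rest.map (fun x => x.1) :=
          List.mem_map.mpr ⟨(k, v), h, rfl⟩
        have h2 : a.1 ∉ rest.map (fun x => x.1) :=
          (List.nodup_cons.mp (by simpa using hnd)).1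
        exact h2 (hk ▸ h1)
    · rw [if_neg (by simp [hk])]
      refine ih k v (List.nodup_cons.mp (by simpa using hnd)).2 ?_
      rcases List.mem_cons.mp hm with h | h
      · exact absurd (congrArg Prod.fst h).symm hk
      · exact h

-- ===== VERDICT (by name: the statement is the Claim_ definition above) =====
theorem apply_decay_spec : Claim_equal_apply_decay := by
  intro filled players full_dates _hdom _hpre
  unfold Spec_apply_decay apply_decay apply_decay_alt
  have hgetD : ∀ q, (bVisits filled players full_dates).getD q [] =
      pvSeq filled players q full_dates 0 := by
    intro q
    unfold bVisits
    have h := bVisits_getD filled players full_dates 0 PySem.Dict.empty q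
    simpa [PySem.Dict.getD, PySem.Dict.get?, PySem.Dict.empty] using h
  have hnodup : ((bVisits filled players full_dates).items.map (fun x => x.1)).Nodup :=
    bVisits_nodup filled players full_dates
  have hitems : ∀ qs ∈ (bVisits filled players full_dates).items,
      qs.2 = pvSeq filled players qs.1 full_dates 0 := by
    intro qs hqs
    have hget : (bVisits filled players full_dates).get? qs.1 = some qs.2 :=
      get?_of_mem_items (bVisits filled players full_dates).items qs.1 qs.2 hnodup
        (by rcases qs with ⟨q, sq⟩; exact hqs)
    have hgd : (bVisits filled players full_dates).getD qs.1 [] = qs.2 := by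
      simp [PySem.Dict.getD, hget]
    rw [← hgd, hgetD]
  have hks : ∀ p ∈ players, pvSeq filled players p full_dates 0 ≠ [] →
      p ∈ (bVisits filled players full_dates).keys := by
    intro p _ hne
    by_contra hmem
    have h1 : (bVisits filled players full_dates).get? p = none := by
      rw [PySem.Dict.get?_eq_none_iff_contains]
      cases h : (bVisits filled players full_dates).contains p
      · rfl
      · exact absurd ((PySem.Dict.contains_iff_mem_keys _ _).mp h) hmem
    have h2 : (bVisits filled players full_dates).getD p [] = [] := by
      simp [PySem.Dict.getD, h1]
    rw [hgetD] at h2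
    exact hne h2
  have hcell : ∀ x y : Int, (bCellTable (bVisits filled players full_dates)).get? (x, y) =
      ((bVisits filled players full_dates).keys).findSome?
        (fun q => cAt2 filled players q [] full_dates x y) := by
    intro x y
    unfold bCellTable
    have hveq : (bVisits filled players full_dates).values =
        (bVisits filled players full_dates).items.map (fun x => x.2) := rfl
    rw [hveq, List.foldl_map]
    have h := tableFold filled players full_dates (bVisits filled players full_dates).items
      PySem.Dict.empty hitems hnodup x y
    rw [h]
    have hkeq : ((bVisits filled players full_dates).items.map Prod.fst) =
        (bVisits filled players full_dates).keys := rfl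
    rw [hkeq]
    cases hf : ((bVisits filled players full_dates).keys).findSome?
        (fun q => cAt2 filled players q [] full_dates x y)
    · simp [PySem.Dict.get?, PySem.Dict.empty]
    · rfl
  have hinv : ∀ p ∈ players, pvInv filled (players.count p) [] p
      PySem.Dict.empty PySem.Dict.empty := by
    intro p _
    constructor
    · simp [pvHist, PySem.Dict.get?, PySem.Dict.empty]
    · intro hne
      simp [pvHist] at hne
  have h := outer_fold filled players (bCellTable (bVisits filled players full_dates))
    ((bVisits filled players full_dates).keys) full_dates hcell hks full_dates []
    PySem.Dict.empty PySem.Dict.empty PySem.Dict.empty rfl hinv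
  simp only [List.length_nil, Nat.cast_zero] at h
  rw [h]
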